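-- pv_equiv track=rewrite | github.com/DanrleyFelix/numeric_converter | src/presentation/ui/components/converter_panel/helpers.py | display_position_from_raw_index
-- ===== SOURCE A (Python) =====
-- def display_padding_len(display: str, raw_value: str) -> int:
--     compact = "".join(display.split())
--     if raw_value and compact.endswith(raw_value):
--         return len(compact) - len(raw_value)
--     return max(0, len(compact) - len(raw_value))
--
-- def display_position_from_raw_index(display: str, raw_value: str, raw_index: int) -> int:
--     target_compact_index = display_padding_len(display, raw_value) + max(
--         0,
--         min(raw_index, len(raw_value)),
--     )
--     compact_count = 0
--     for position, char in enumerate(display):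
--         if char.isspace():
--             continue
--         if compact_count >= target_compact_index:
--             return position
--         compact_count += 1
--     return len(display)
-- ===== SOURCE B (Python) =====
-- def display_padding_len(display: str, raw_value: str) -> int:
--     compact = "".join(display.split())
--     if raw_value and compact.endswith(raw_value):
--         return len(compact) - len(raw_value)
--     return max(0, len(compact) - len(raw_value))
--
--
-- def display_position_from_raw_index(display: str, raw_value: str, raw_index: int) -> int:
--     # Decompose display into maximal runs of non-whitespace characters, then
--     # locate the target compact index by arithmetic over run lengths.
--     target = display_padding_len(display, raw_value) + max(0, min(raw_index, len(raw_value)))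
--     runs = []  # (start position in display, run length)
--     i, n = 0, len(display)
--     while i < n:
--         if display[i].isspace():
--             i += 1
--         else:
--             j = i
--             while j < n and not display[j].isspace():
--                 j += 1
--             runs.append((i, j - i))
--             i = j
--     for start, length in runs:
--         if target < length:
--             return start + target
--         target -= length
--     return n
-- ===== Notes on version B (the rewrite author's own statement) =====
-- stated objective: alternative
-- what changed: Replaces A's per-character scan-and-count with early return by a run-length decomposition: B first groups display into maximal non-whitespace runs (start, length), then locates the target compact index arithmetically by subtracting run lengths until it falls inside a run.
import Mathlib
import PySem

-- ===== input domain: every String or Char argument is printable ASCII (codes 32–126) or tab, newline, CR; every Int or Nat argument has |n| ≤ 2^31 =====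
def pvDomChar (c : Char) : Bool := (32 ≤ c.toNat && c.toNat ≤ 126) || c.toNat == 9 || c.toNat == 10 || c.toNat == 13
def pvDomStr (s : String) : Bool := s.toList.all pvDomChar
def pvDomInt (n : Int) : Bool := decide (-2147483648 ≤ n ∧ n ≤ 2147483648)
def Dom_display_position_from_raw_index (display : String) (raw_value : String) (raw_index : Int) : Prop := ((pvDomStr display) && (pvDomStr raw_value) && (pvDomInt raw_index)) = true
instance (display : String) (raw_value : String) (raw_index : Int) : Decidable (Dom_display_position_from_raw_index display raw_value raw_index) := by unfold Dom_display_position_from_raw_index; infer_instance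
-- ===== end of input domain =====

-- B replaces A's per-character scan-and-count loop by a run-length decomposition of display
-- (maximal non-space runs) followed by arithmetic location of the target index; same return value.

-- ===== PORT A =====
-- shared module helper (identical in both Python sources)
def display_padding_len (display : String) (raw_value : String) : Int :=
  let compact := PySem.Chars.join [] (PySem.Chars.split₀ display.toList)
  if raw_value.toList ≠ [] ∧ PySem.Chars.endswith compact raw_value.toList = true then
    (compact.length : Int) - (raw_value.toList.length : Int)
  else
    max 0 ((compact.length : Int) - (raw_value.toList.length : Int))

-- A's 'for position, char in enumerate(display)' loop with early return; total = len(display)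
def dpriLoop (target : Int) (cs : List Char) (pos : Int) (cnt : Int) (total : Int) : Int :=
  match cs with
  | [] => total
  | c :: rest =>
    if PySem.Chars.isspace c then dpriLoop target rest (pos + 1) cnt total
    else if cnt ≥ target then pos
    else dpriLoop target rest (pos + 1) (cnt + 1) total

def display_position_from_raw_index (display : String) (raw_value : String) (raw_index : Int) : Int :=
  let target := display_padding_len display raw_value + max 0 (min raw_index (raw_value.toList.length : Int))
  dpriLoop target display.toList 0 0 (display.toList.length : Int)

-- ===== PORT B =====
-- Source B's while loop building runs: maximal non-space runs as (start position, length)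
def dpriRuns (cs : List Char) (pos : Int) : List (Int × Int) :=
  match cs with
  | [] => []
  | c :: rest =>
    if PySem.Chars.isspace c then dpriRuns rest (pos + 1)
    else
      let tok := rest.takeWhile (fun d => !PySem.Chars.isspace d)
      (pos, 1 + (tok.length : Int)) ::
        dpriRuns (rest.dropWhile (fun d => !PySem.Chars.isspace d)) (pos + 1 + (tok.length : Int))
  termination_by cs.length
  decreasing_by
  · simp
  · have := List.length_dropWhile_le (p := fun d => !PySem.Chars.isspace d) (l := rest)
    simp; omega

-- Source B's for loop over the runs
def dpriLocate (rs : List (Int × Int)) (t : Int) (total : Int) : Int :=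
  match rs with
  | [] => total
  | (s, l) :: rest => if t < l then s + t else dpriLocate rest (t - l) total

def display_position_from_raw_index_alt (display : String) (raw_value : String) (raw_index : Int) : Int :=
  let target := display_padding_len display raw_value + max 0 (min raw_index (raw_value.toList.length : Int))
  dpriLocate (dpriRuns display.toList 0) target (display.toList.length : Int)

-- ===== PRECONDITION & SPEC =====
def Spec_display_position_from_raw_index (display : String) (raw_value : String) (raw_index : Int) (out : Int) : Prop := out = display_position_from_raw_index_alt display raw_value raw_index
instance (display : String) (raw_value : String) (raw_index : Int) (out : Int) : Decidable (Spec_display_position_from_raw_index display raw_value raw_index out) := by unfold Spec_display_position_from_raw_index; infer_instance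

-- ===== CLAIM (what is proved, stated in full; the proofs are below) =====
def Claim_equal_display_position_from_raw_index : Prop := ∀ (display : String) (raw_value : String) (raw_index : Int), Dom_display_position_from_raw_index display raw_value raw_index → Spec_display_position_from_raw_index display raw_value raw_index (display_position_from_raw_index display raw_value raw_index)

-- ===== LEMMAS AND PROOFS =====

-- A's loop depends only on target - cnt
theorem dpriLoop_shift (cs : List Char) (t pos cnt total : Int) :
    dpriLoop t cs pos cnt total = dpriLoop (t - cnt) cs pos 0 total := by
  induction cs generalizing pos cnt t with
  | nil => simp [dpriLoop]
  | cons c rest ih =>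
    by_cases hs : PySem.Chars.isspace c
    · simp [dpriLoop, hs, ih]
    · have hiff : cnt ≥ t ↔ (0 : Int) ≥ t - cnt := by omega
      by_cases hge : cnt ≥ t
      · simp [dpriLoop, hs, hge, hiff.mp hge]
      · have hge' : ¬ (0 : Int) ≥ t - cnt := by omega
        simp only [dpriLoop, hs, Bool.false_eq_true, if_false, if_neg hge, if_neg hge']
        rw [ih t (pos + 1) (cnt + 1), ih (t - cnt) (pos + 1) (0 + 1)]
        congr 1
        omega

-- consuming a whole non-space run at once
theorem dpriLoop_run (tok : List Char) (hn : ∀ c ∈ tok, PySem.Chars.isspace c = false)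
    (rest : List Char) (u q total : Int) (hu : 0 ≤ u) :
    dpriLoop u (tok ++ rest) q 0 total =
      if u < (tok.length : Int) then q + u
      else dpriLoop (u - (tok.length : Int)) rest (q + (tok.length : Int)) 0 total := by
  induction tok generalizing q u with
  | nil => simp [hu.not_gt]  -- u < 0 is false
  | cons c tok' ih =>
    have hc : PySem.Chars.isspace c = false := hn c (by simp)
    have hn' : ∀ d ∈ tok', PySem.Chars.isspace d = false := fun d hd => hn d (by simp [hd])
    by_cases h0 : (0 : Int) ≥ u
    · have hu0 : u = 0 := le_antisymm h0 hu
      simp [dpriLoop, hc, hu0]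
    · have h1 : (1 : Int) ≤ u := by omega
      simp only [List.cons_append, dpriLoop, hc, Bool.false_eq_true, if_false, if_neg h0]
      rw [dpriLoop_shift]
      have hz : u - (0 + 1) = u - 1 := by ring
      rw [hz, ih hn' (u - 1) (q + 1) (by omega)]
      have hlen : ((c :: tok').length : Int) = (tok'.length : Int) + 1 := by simp
      by_cases hlt : u - 1 < (tok'.length : Int)
      · have hlt' : u < ((c :: tok').length : Int) := by omega
        simp [hlt]
        omega
      · have hlt' : ¬ u < ((c :: tok').length : Int) := by omega
        rw [if_neg hlt, if_neg hlt']
        have e1 : u - 1 - (tok'.length : Int) = u - ((c :: tok').length : Int) := by rw [hlen]; ring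
        have e2 : q + 1 + (tok'.length : Int) = q + ((c :: tok').length : Int) := by rw [hlen]; ring
        rw [e1, e2]

-- main: A's counting loop equals B's run-table location
theorem dpriLoop_eq_locate (N : Nat) : ∀ cs : List Char, cs.length ≤ N →
    ∀ (pos t total : Int), 0 ≤ t →
    dpriLoop t cs pos 0 total = dpriLocate (dpriRuns cs pos) t total := by
  induction N with
  | zero =>
    intro cs hcs pos t total _
    have : cs = [] := List.length_eq_zero_iff.mp (Nat.le_zero.mp hcs)
    subst this
    simp [dpriLoop, dpriRuns, dpriLocate]
  | succ n ih =>
    intro cs hcs pos t total ht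
    match cs with
    | [] => simp [dpriLoop, dpriRuns, dpriLocate]
    | c :: rest =>
      have hrest : rest.length ≤ n := by simpa using hcs
      by_cases hs : PySem.Chars.isspace c
      · rw [dpriLoop, dpriRuns]
        simp only [hs, if_true]
        exact ih rest hrest (pos + 1) t total ht
      · set tok := rest.takeWhile (fun d => !PySem.Chars.isspace d) with htok
        set rest' := rest.dropWhile (fun d => !PySem.Chars.isspace d) with hrest'
        have hsplit : rest = tok ++ rest' := (List.takeWhile_append_dropWhile).symm
        have htoknn : ∀ d ∈ tok, PySem.Chars.isspace d = false := by
          intro d hd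
          have := List.mem_takeWhile_imp hd
          simpa using this
        have hruns : dpriRuns (c :: rest) pos =
            (pos, 1 + (tok.length : Int)) :: dpriRuns rest' (pos + 1 + (tok.length : Int)) := by
          rw [dpriRuns]; simp [hs, ← htok, ← hrest']
        rw [hruns, dpriLocate]
        by_cases h0 : (0 : Int) ≥ t
        · have ht0 : t = 0 := le_antisymm h0 ht
          rw [dpriLoop]
          simp [hs, ht0]
          omega
        · rw [dpriLoop]
          simp only [hs, Bool.false_eq_true, if_false, if_neg h0]
          rw [dpriLoop_shift]
          have hzo : t - (0 + 1) = t - 1 := by ring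
          rw [hzo]
          conv_lhs => rw [hsplit]
          rw [dpriLoop_run tok htoknn rest' (t - 1) (pos + 1) total (by omega)]
          have hrest'len : rest'.length ≤ n := by
            rw [hrest']
            have := List.length_dropWhile_le (p := fun d => !PySem.Chars.isspace d) (l := rest)
            omega
          by_cases hlt : t - 1 < (tok.length : Int)
          · have hlt' : t < 1 + (tok.length : Int) := by omega
            simp [hlt, hlt']
          · have hlt' : ¬ t < 1 + (tok.length : Int) := by omega
            simp only [if_neg hlt, if_neg hlt']
            rw [ih rest' hrest'len (pos + 1 + (tok.length : Int)) (t - 1 - (tok.length : Int)) total (by omega)]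
            congr 1
            omega

theorem padding_nonneg (display raw_value : String) : 0 ≤ display_padding_len display raw_value := by
  simp only [display_padding_len]
  split_ifs with h
  · have hsuf := (PySem.Chars.endswith_iff _ _).mp h.2
    have hle := hsuf.length_le
    omega
  · exact le_max_left _ _

-- ===== VERDICT (by name: the statement is the Claim_ definition above) =====
theorem display_position_from_raw_index_spec : Claim_equal_display_position_from_raw_index := by
  intro display raw_value raw_index _
  unfold Spec_display_position_from_raw_index
  unfold display_position_from_raw_index display_position_from_raw_index_alt
  have hpad := padding_nonneg display raw_value
  have ht : 0 ≤ display_padding_len display raw_value + max 0 (min raw_index (raw_value.toList.length : Int)) := by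
    have : (0 : Int) ≤ max 0 (min raw_index (raw_value.toList.length : Int)) := le_max_left _ _
    omega
  exact dpriLoop_eq_locate display.toList.length display.toList le_rfl 0 _ _ ht
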